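-- pv_equiv track=rewrite | github.com/arjo6/Hunter350 | Hunter350.py | identify_device
-- ===== SOURCE A (Python) =====
-- def identify_device(mac: str) -> str:
--     """Identifies device type based on MAC address prefix."""
--     prefixes = {
--         "PC": ["00:1A:4B", "00:1D:60", "3C:D9:2B"],
--         "Mobile": ["D0:22:BE", "28:EF:01", "5C:0A:5B"],
--         "Camera": ["00:0F:7C", "00:1B:C1", "58:BF:EA"],
--         "Router": ["F4:EC:38", "C8:3A:35", "18:31:BF"]
--     }
--
--     for device, mac_prefixes in prefixes.items():
--         if any(mac.startswith(prefix) for prefix in mac_prefixes):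
--             return device
--     return "Unknown"
-- ===== SOURCE B (Python) =====
-- _DEVICE_BY_PREFIX = {
--     "00:1A:4B": "PC", "00:1D:60": "PC", "3C:D9:2B": "PC",
--     "D0:22:BE": "Mobile", "28:EF:01": "Mobile", "5C:0A:5B": "Mobile",
--     "00:0F:7C": "Camera", "00:1B:C1": "Camera", "58:BF:EA": "Camera",
--     "F4:EC:38": "Router", "C8:3A:35": "Router", "18:31:BF": "Router",
-- }
--
-- def identify_device(mac: str) -> str:
--     """Identifies device type based on MAC address prefix."""
--     return _DEVICE_BY_PREFIX.get(mac[:8], "Unknown")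
-- ===== Notes on version B (the rewrite author's own statement) =====
-- stated objective: simpler
-- what changed: Replaced the loop over a nested device->prefix-list dict with a single precomputed flat prefix->device table and one lookup of mac[:8] (all prefixes are exactly 8 chars), removing all loops.
import Mathlib
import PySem

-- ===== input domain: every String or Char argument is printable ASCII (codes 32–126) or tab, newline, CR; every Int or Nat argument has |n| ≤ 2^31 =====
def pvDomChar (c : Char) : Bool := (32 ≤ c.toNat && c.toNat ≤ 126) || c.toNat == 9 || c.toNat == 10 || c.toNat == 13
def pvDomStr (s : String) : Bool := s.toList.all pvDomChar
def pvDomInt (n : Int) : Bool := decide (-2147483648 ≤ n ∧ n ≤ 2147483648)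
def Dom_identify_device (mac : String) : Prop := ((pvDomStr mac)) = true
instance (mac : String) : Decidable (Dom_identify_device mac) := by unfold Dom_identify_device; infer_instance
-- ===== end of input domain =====

-- B replaces A's loop over a nested device→prefix-list dict by one lookup of mac[:8]
-- in a precomputed flat prefix→device table (all prefixes are 8 chars): simpler, no loop.

-- ===== PORT A =====
-- the loop 'for device, mac_prefixes in prefixes.items(): if any(...): return device'
def identifyLoop (mac : String) : List (String × List String) → String
  | [] => "Unknown"
  | (device, macPrefixes) :: rest =>
      if macPrefixes.any (fun prefix_ => PySem.Str.startswith mac prefix_) then device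
      else identifyLoop mac rest

def identify_device (mac : String) : String :=
  let prefixes : List (String × List String) :=
    [("PC", ["00:1A:4B", "00:1D:60", "3C:D9:2B"]),
     ("Mobile", ["D0:22:BE", "28:EF:01", "5C:0A:5B"]),
     ("Camera", ["00:0F:7C", "00:1B:C1", "58:BF:EA"]),
     ("Router", ["F4:EC:38", "C8:3A:35", "18:31:BF"])]
  identifyLoop mac prefixes

-- ===== PORT B =====
def deviceByPrefix : PySem.Dict String String :=
  PySem.Dict.ofList
    [("00:1A:4B", "PC"), ("00:1D:60", "PC"), ("3C:D9:2B", "PC"),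
     ("D0:22:BE", "Mobile"), ("28:EF:01", "Mobile"), ("5C:0A:5B", "Mobile"),
     ("00:0F:7C", "Camera"), ("00:1B:C1", "Camera"), ("58:BF:EA", "Camera"),
     ("F4:EC:38", "Router"), ("C8:3A:35", "Router"), ("18:31:BF", "Router")]

def identify_device_alt (mac : String) : String :=
  PySem.Dict.getD deviceByPrefix (PySem.Str.slice mac none (some 8)) "Unknown"

-- ===== PRECONDITION & SPEC =====
def Spec_identify_device (mac : String) (out : String) : Prop := out = identify_device_alt mac
instance (mac : String) (out : String) : Decidable (Spec_identify_device mac out) := by unfold Spec_identify_device; infer_instance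

-- ===== CLAIM (what is proved, stated in full; the proofs are below) =====
def Claim_equal_identify_device : Prop := ∀ (mac : String), Dom_identify_device mac → Spec_identify_device mac (identify_device mac)

-- ===== LEMMAS AND PROOFS =====

-- the literal ofList evaluates to the plain association list (keys are distinct)
lemma deviceByPrefix_mk : deviceByPrefix = PySem.Dict.mk
    [("00:1A:4B", "PC"), ("00:1D:60", "PC"), ("3C:D9:2B", "PC"),
     ("D0:22:BE", "Mobile"), ("28:EF:01", "Mobile"), ("5C:0A:5B", "Mobile"),
     ("00:0F:7C", "Camera"), ("00:1B:C1", "Camera"), ("58:BF:EA", "Camera"),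
     ("F4:EC:38", "Router"), ("C8:3A:35", "Router"), ("18:31:BF", "Router")] := by decide

-- startswith on an 8-char prefix is an exact comparison with mac[:8]
lemma startswith_eq_slice_eq (mac p : String) (hp : p.toList.length = 8) :
    PySem.Str.startswith mac p = (PySem.Str.slice mac none (some 8) == p) := by
  rw [Bool.eq_iff_iff]
  simp only [PySem.Str.startswith_eq, PySem.Chars.startswith_iff, beq_iff_eq]
  constructor
  · intro h
    apply String.ext
    have := List.prefix_iff_eq_take.mp h
    simpa [PySem.Str.toList_slice, PySem.List.slice_to (xs := mac.toList) (b := (8:Int)) (by norm_num), hp] using this.symm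
  · intro h
    rw [List.prefix_iff_eq_take, hp]
    have := congrArg String.toList h
    simpa [PySem.Str.toList_slice, PySem.List.slice_to (xs := mac.toList) (b := (8:Int)) (by norm_num)] using this.symm

-- ===== VERDICT (by name: the statement is the Claim_ definition above) =====
theorem identify_device_spec : Claim_equal_identify_device := by
  intro mac _
  show identify_device mac = identify_device_alt mac
  unfold identify_device identify_device_alt
  simp only [identifyLoop, List.any_cons, List.any_nil,
    startswith_eq_slice_eq mac "00:1A:4B" (by decide),
    startswith_eq_slice_eq mac "00:1D:60" (by decide),
    startswith_eq_slice_eq mac "3C:D9:2B" (by decide),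
    startswith_eq_slice_eq mac "D0:22:BE" (by decide),
    startswith_eq_slice_eq mac "28:EF:01" (by decide),
    startswith_eq_slice_eq mac "5C:0A:5B" (by decide),
    startswith_eq_slice_eq mac "00:0F:7C" (by decide),
    startswith_eq_slice_eq mac "00:1B:C1" (by decide),
    startswith_eq_slice_eq mac "58:BF:EA" (by decide),
    startswith_eq_slice_eq mac "F4:EC:38" (by decide),
    startswith_eq_slice_eq mac "C8:3A:35" (by decide),
    startswith_eq_slice_eq mac "18:31:BF" (by decide)]
  set k := PySem.Str.slice mac none (some 8) with hk
  by_cases h1 : k = "00:1A:4B"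
  · simp [deviceByPrefix_mk, PySem.Dict.getD, PySem.Dict.get?_mk_cons, h1]
  by_cases h2 : k = "00:1D:60"
  · simp [deviceByPrefix_mk, PySem.Dict.getD, PySem.Dict.get?_mk_cons, h2]
  by_cases h3 : k = "3C:D9:2B"
  · simp [deviceByPrefix_mk, PySem.Dict.getD, PySem.Dict.get?_mk_cons, h3]
  by_cases h4 : k = "D0:22:BE"
  · simp [deviceByPrefix_mk, PySem.Dict.getD, PySem.Dict.get?_mk_cons, h4]
  by_cases h5 : k = "28:EF:01"
  · simp [deviceByPrefix_mk, PySem.Dict.getD, PySem.Dict.get?_mk_cons, h5]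
  by_cases h6 : k = "5C:0A:5B"
  · simp [deviceByPrefix_mk, PySem.Dict.getD, PySem.Dict.get?_mk_cons, h6]
  by_cases h7 : k = "00:0F:7C"
  · simp [deviceByPrefix_mk, PySem.Dict.getD, PySem.Dict.get?_mk_cons, h7]
  by_cases h8 : k = "00:1B:C1"
  · simp [deviceByPrefix_mk, PySem.Dict.getD, PySem.Dict.get?_mk_cons, h8]
  by_cases h9 : k = "58:BF:EA"
  · simp [deviceByPrefix_mk, PySem.Dict.getD, PySem.Dict.get?_mk_cons, h9]
  by_cases h10 : k = "F4:EC:38"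
  · simp [deviceByPrefix_mk, PySem.Dict.getD, PySem.Dict.get?_mk_cons, h10]
  by_cases h11 : k = "C8:3A:35"
  · simp [deviceByPrefix_mk, PySem.Dict.getD, PySem.Dict.get?_mk_cons, h11]
  by_cases h12 : k = "18:31:BF"
  · simp [deviceByPrefix_mk, PySem.Dict.getD, PySem.Dict.get?_mk_cons, h12]
  simp [deviceByPrefix_mk, PySem.Dict.getD, PySem.Dict.get?,
    h1, h2, h3, h4, h5, h6, h7, h8, h9, h10, h11, h12,
    Ne.symm h1, Ne.symm h2, Ne.symm h3, Ne.symm h4, Ne.symm h5, Ne.symm h6,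
    Ne.symm h7, Ne.symm h8, Ne.symm h9, Ne.symm h10, Ne.symm h11, Ne.symm h12]
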